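-- pv_equiv track=rewrite | github.com/moritz/gomon | gomon/model.py | pipeline_result
-- ===== SOURCE A (Python) =====
-- def map_results(results):
--     if len(results) == 1:
--         return results[0].lower()
--     return 'mixed'
--
-- def pipeline_result(stages):
--     for stage in reversed(stages):
--         if stage['results'] == ['notyet']:
--             pass
--         elif stage['results'] == ['Passed']:
--             return 'Passed'
--         else:
--             return map_results(stage['results'])
--     return 'notyet'
-- ===== SOURCE B (Python) =====
-- def pipeline_result(stages):
--     if not stages:
--         return 'notyet'
--     results = stages[-1]['results']
--     if results == ['notyet']:
--         return pipeline_result(stages[:-1])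
--     if results == ['Passed']:
--         return 'Passed'
--     if len(results) == 1:
--         return results[0].lower()
--     return 'mixed'
-- ===== Notes on version B (the rewrite author's own statement) =====
-- stated objective: alternative
-- what changed: Replaces the reversed iterative loop with its pass/elif chain and map_results helper by direct recursion that inspects the last stage and recurses on stages[:-1], with the classification inlined.
import Mathlib
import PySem

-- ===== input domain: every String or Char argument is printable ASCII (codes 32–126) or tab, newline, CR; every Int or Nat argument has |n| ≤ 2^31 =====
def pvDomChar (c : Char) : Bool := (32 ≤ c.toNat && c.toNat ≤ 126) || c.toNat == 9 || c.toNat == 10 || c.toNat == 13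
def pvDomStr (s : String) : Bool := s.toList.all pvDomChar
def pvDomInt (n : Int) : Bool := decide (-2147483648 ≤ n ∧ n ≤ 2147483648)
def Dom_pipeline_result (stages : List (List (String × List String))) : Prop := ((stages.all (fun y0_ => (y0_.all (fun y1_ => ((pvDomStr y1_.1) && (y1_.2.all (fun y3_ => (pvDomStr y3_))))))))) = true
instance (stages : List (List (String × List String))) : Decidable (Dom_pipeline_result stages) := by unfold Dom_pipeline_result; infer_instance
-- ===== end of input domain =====

-- B replaces A's reversed iterative loop (pass/elif chain + map_results helper) by direct recursion on the last stage with stages[:-1] and inline classification; same cost class, no speed claim.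


-- ===== PORT A =====
-- stage['results'] (first-match lookup; none = KeyError, excluded by Pre_, so the default [] is never the value used)
def pvResGet (stage : List (String × List String)) : List String :=
  ((PySem.Dict.mk stage).get? "results").getD []

def map_results_port (results : List String) : String :=
  if results.length = 1 then PySem.Str.lower ((PySem.List.pyGet? results 0).getD "") else "mixed"

def pipeline_result_loop : List (List (String × List String)) → String
  | [] => "notyet"
  | stage :: rest =>
      let res := pvResGet stage
      if res = ["notyet"] then pipeline_result_loop rest
      else if res = ["Passed"] then "Passed"
      else map_results_port res

def pipeline_result (stages : List (List (String × List String))) : String :=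
  pipeline_result_loop stages.reverse

-- ===== PORT B =====
-- 'if not stages' → the emptiness test; stages[-1] → getLast; stages[:-1] → dropLast; stage['results'] as in A
def pipeline_result_alt (stages : List (List (String × List String))) : String :=
  if hne : stages = [] then "notyet"
  else
    let results := ((PySem.Dict.mk (stages.getLast hne)).get? "results").getD []
    if results = ["notyet"] then pipeline_result_alt stages.dropLast
    else if results = ["Passed"] then "Passed"
    else if results.length = 1 then PySem.Str.lower ((PySem.List.pyGet? results 0).getD "")
    else "mixed"
termination_by stages.length
decreasing_by
  have hpos : 0 < stages.length := List.length_pos_of_ne_nil hne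
  simpa [List.length_dropLast] using Nat.sub_lt hpos Nat.one_pos

-- ===== PRECONDITION & SPEC =====
-- Pre_ excludes exactly the inputs on which A (and B) raise KeyError: scanning from the end, the first
-- stage whose 'results' entry is not ['notyet'] must actually have a 'results' key.
def Pre_pipeline_result (stages : List (List (String × List String))) : Prop :=
  ∀ s ∈ (stages.reverse.dropWhile
          (fun s => (PySem.Dict.mk s).get? "results" == some ["notyet"])).take 1,
    ((PySem.Dict.mk s).get? "results").isSome = true
instance (stages : List (List (String × List String))) : Decidable (Pre_pipeline_result stages) := by
  unfold Pre_pipeline_result; infer_instance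

def pvWitness_pipeline_result : (List (List (String × List String))) :=
  [[("results", ["Passed"])], [("results", ["notyet"])]]

def Spec_pipeline_result (stages : List (List (String × List String))) (out : String) : Prop := out = pipeline_result_alt stages
instance (stages : List (List (String × List String))) (out : String) : Decidable (Spec_pipeline_result stages out) := by unfold Spec_pipeline_result; infer_instance

-- ===== CLAIM (what is proved, stated in full; the proofs are below) =====
def Claim_equal_pipeline_result : Prop := ∀ (stages : List (List (String × List String))), Dom_pipeline_result stages → Pre_pipeline_result stages → Spec_pipeline_result stages (pipeline_result stages)

-- ===== LEMMAS AND PROOFS =====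
-- A's loop over the reversed list computes exactly B's back-to-front recursion.
theorem loop_eq_alt_reverse (m : List (List (String × List String))) :
    pipeline_result_loop m = pipeline_result_alt m.reverse := by
  induction m with
  | nil => rw [pipeline_result_alt.eq_def]; rfl
  | cons s t ih =>
      rw [pipeline_result_alt.eq_def]
      simp only [List.reverse_cons]
      rw [dif_neg (by simp : ¬(t.reverse ++ [s] = []))]
      simp only [List.dropLast_concat, List.getLast_concat]
      simp [pipeline_result_loop, pvResGet, map_results_port, ih]

-- ===== VERDICT (by name: the statement is the Claim_ definition above) =====
theorem pipeline_result_spec : Claim_equal_pipeline_result := by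
  intro stages _ _
  show pipeline_result stages = pipeline_result_alt stages
  rw [pipeline_result, loop_eq_alt_reverse, List.reverse_reverse]
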